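-- pv_equiv track=rewrite | github.com/BrunoMoriB/stockmarket-manager | extras/scripts/gen-bd-inserts-partir-dados-b3.py | gen_setores
-- ===== SOURCE A (Python) =====
-- def gen_setores(empresas):
--     setores = []
--     inserts = ['\n/* Popular a tabela de Setor */\n']
--     for e in empresas:
--         setores.extend([s for s in e['classificacao_setorial']])
--     for s in list(dict.fromkeys(setores)):
--         inserts.append("insert into Setor (nome) values ('%s');\n" % s)
--     return inserts
-- ===== SOURCE B (Python) =====
-- def emit(setores):
--     # Recursive nub: emit the head's insert, then recurse on the tail with
--     # every later copy of the head filtered out.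
--     if not setores:
--         return []
--     head = setores[0]
--     return ["insert into Setor (nome) values ('%s');\n" % head] \
--         + emit([s for s in setores[1:] if s != head])
--
-- def gen_setores(empresas):
--     setores = [s for e in empresas for s in e['classificacao_setorial']]
--     return ['\n/* Popular a tabela de Setor */\n'] + emit(setores)
-- ===== Notes on version B (the rewrite author's own statement) =====
-- stated objective: alternative
-- what changed: Replaces A's two-phase flatten-then-dict.fromkeys dedup loop by a recursive nub that emits the head's insert and recurses on the tail with later copies of the head filtered out (no dict/set maintained).
import Mathlib
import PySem

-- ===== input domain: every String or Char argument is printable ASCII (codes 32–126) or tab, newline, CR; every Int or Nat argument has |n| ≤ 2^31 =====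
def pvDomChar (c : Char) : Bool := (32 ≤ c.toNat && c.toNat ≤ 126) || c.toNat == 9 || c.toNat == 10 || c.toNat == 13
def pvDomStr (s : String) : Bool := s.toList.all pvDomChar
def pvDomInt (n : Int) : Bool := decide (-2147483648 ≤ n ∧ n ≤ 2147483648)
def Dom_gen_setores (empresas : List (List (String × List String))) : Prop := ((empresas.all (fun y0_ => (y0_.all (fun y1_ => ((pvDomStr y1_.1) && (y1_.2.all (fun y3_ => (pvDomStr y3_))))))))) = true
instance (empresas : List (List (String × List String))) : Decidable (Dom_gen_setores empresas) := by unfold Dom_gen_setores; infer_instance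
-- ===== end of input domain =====

-- B replaces A's flatten + dict.fromkeys dedup by a recursive nub that filters later duplicates of the head (alternative decomposition, same output order); proved equal wherever A returns.

-- ===== PORT A =====
-- shared by both ports: "insert into Setor (nome) values ('%s');\n" % s
def fmtInsert (s : String) : String := "insert into Setor (nome) values ('" ++ s ++ "');\n"

def gen_setores (empresas : List (List (String × List String))) : List String :=
  -- setores = []; for e in empresas: setores.extend([s for s in e['classificacao_setorial']])
  -- then: for s in list(dict.fromkeys(setores)): inserts.append(...)
  (PySem.List.dedup
      (empresas.foldl (fun acc e => acc ++ ((PySem.Dict.mk e).get? "classificacao_setorial").getD []) [])).foldl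
    (fun acc s => acc ++ [fmtInsert s])
    ["\n/* Popular a tabela de Setor */\n"]

-- ===== PORT B =====
-- emit: recursive nub; terminates because the filtered tail is no longer than the tail
def emit (setores : List String) : List String :=
  match setores with
  | [] => []
  | head :: rest =>
      fmtInsert head :: emit (rest.filter (fun s => s != head))
termination_by setores.length
decreasing_by
  simpa using Nat.lt_succ_of_le (List.length_filter_le _ rest)

def gen_setores_alt (empresas : List (List (String × List String))) : List String :=
  "\n/* Popular a tabela de Setor */\n"
    :: emit (empresas.flatMap (fun e => ((PySem.Dict.mk e).get? "classificacao_setorial").getD []))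

-- ===== PRECONDITION & SPEC =====
-- Pre_ excludes exactly the inputs where some company dict lacks the key 'classificacao_setorial',
-- on which Python A raises KeyError (B raises there too).
def Pre_gen_setores (empresas : List (List (String × List String))) : Prop :=
  ∀ e ∈ empresas, (PySem.Dict.mk e).contains "classificacao_setorial" = true
instance (empresas : List (List (String × List String))) : Decidable (Pre_gen_setores empresas) := by
  unfold Pre_gen_setores; infer_instance

def pvWitness_gen_setores : (List (List (String × List String))) :=
  [[("classificacao_setorial", ["Bancos", "Seguros"])], [("classificacao_setorial", ["Bancos"])]]

def Spec_gen_setores (empresas : List (List (String × List String))) (out : List String) : Prop := out = gen_setores_alt empresas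
instance (empresas : List (List (String × List String))) (out : List String) : Decidable (Spec_gen_setores empresas out) := by unfold Spec_gen_setores; infer_instance

-- ===== CLAIM (what is proved, stated in full; the proofs are below) =====
def Claim_equal_gen_setores : Prop := ∀ (empresas : List (List (String × List String))), Dom_gen_setores empresas → Pre_gen_setores empresas → Spec_gen_setores empresas (gen_setores empresas)

-- ===== LEMMAS AND PROOFS =====

-- folding PySem.Set.add over a list whose members all differ from x keeps x in front
lemma foldl_add_cons_of_not_mem (x : String) (acc : List String) (m : List String)
    (h : ∀ y ∈ m, y ≠ x) :
    m.foldl PySem.Set.add (x :: acc) = x :: m.foldl PySem.Set.add acc := by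
  induction m generalizing acc with
  | nil => rfl
  | cons y rest ih =>
      have hyx : y ≠ x := h y (by simp)
      have hrest : ∀ z ∈ rest, z ≠ x := fun z hz => h z (by simp [hz])
      by_cases hc : y ∈ acc
      · have h1 : PySem.Set.add (x :: acc) y = x :: acc := by
          simp [PySem.Set.add, PySem.Set.contains, hc]
        have h2 : PySem.Set.add acc y = acc := by
          simp [PySem.Set.add, PySem.Set.contains, hc]
        simp only [List.foldl_cons, h1, h2, ih _ hrest]
      · have h1 : PySem.Set.add (x :: acc) y = x :: (acc ++ [y]) := by
          simp [PySem.Set.add, PySem.Set.contains, hc, hyx]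
        have h2 : PySem.Set.add acc y = acc ++ [y] := by
          simp [PySem.Set.add, PySem.Set.contains, hc]
        simp only [List.foldl_cons, h1, h2, ih _ hrest]

-- if x already sits in acc, members equal to x are no-ops: folding over l or over l with
-- the x's filtered out gives the same set
lemma foldl_add_filter (x : String) (acc l : List String) (hx : x ∈ acc) :
    l.foldl PySem.Set.add acc = (l.filter (fun s => s != x)).foldl PySem.Set.add acc := by
  induction l generalizing acc with
  | nil => rfl
  | cons y rest ih =>
      by_cases hyx : y = x
      · subst hyx
        have hy : PySem.Set.add acc y = acc := by
          simp [PySem.Set.add, PySem.Set.contains, hx]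
        simp [hy, ih acc hx]
      · have hacc' : x ∈ PySem.Set.add acc y := by
          unfold PySem.Set.add
          split <;> simp [hx]
        simp [bne_iff_ne, hyx, ih _ hacc']

-- the nub recursion computes dict.fromkeys' ordered dedup, mapped through the format string
lemma emit_eq_map_dedup (l : List String) :
    emit l = (PySem.List.dedup l).map fmtInsert := by
  induction hn : l.length using Nat.strong_induction_on generalizing l with
  | _ n ih =>
    match l with
    | [] => simp [emit, PySem.List.dedup, PySem.Set.ofList, PySem.Set.empty]
    | x :: rest =>
      have hlen : (rest.filter (fun s => s != x)).length < n := by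
        subst hn
        exact Nat.lt_succ_of_le (List.length_filter_le _ rest)
      have hdedup : PySem.List.dedup (x :: rest)
          = x :: PySem.List.dedup (rest.filter (fun s => s != x)) := by
        simp only [PySem.List.dedup, PySem.Set.ofList, List.foldl_cons]
        have hadd : PySem.Set.add PySem.Set.empty x = [x] := by
          simp [PySem.Set.add, PySem.Set.empty, PySem.Set.contains]
        rw [hadd, foldl_add_filter x [x] rest (by simp),
            foldl_add_cons_of_not_mem x [] _
              (by intro y hy; simpa [bne_iff_ne] using (List.of_mem_filter hy))]
        simp [PySem.Set.empty]
      rw [emit, hdedup, List.map_cons, ih _ hlen _ rfl]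

-- A's flatten loop is a flatMap; A's append loop is the header consed onto the map
lemma a_eq (empresas : List (List (String × List String))) :
    gen_setores empresas
      = "\n/* Popular a tabela de Setor */\n"
        :: (PySem.List.dedup
            (empresas.flatMap (fun e => ((PySem.Dict.mk e).get? "classificacao_setorial").getD []))).map fmtInsert := by
  unfold gen_setores
  rw [PySem.List.foldl_append_eq_flatMap
        (g := fun e => ((PySem.Dict.mk e).get? "classificacao_setorial").getD [])]
  rw [PySem.List.foldl_append_singleton_eq_map]
  rfl

-- ===== VERDICT (by name: the statement is the Claim_ definition above) =====
theorem gen_setores_spec : Claim_equal_gen_setores := by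
  intro empresas _ _
  unfold Spec_gen_setores gen_setores_alt
  rw [a_eq, emit_eq_map_dedup]
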